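-- pv_equiv track=rewrite | github.com/kryptoconsultoria/automatizaciones_api | librerias/tests copy.py | tokenize_parts
-- ===== SOURCE A (Python) =====
-- special_tokens = {"da", "de", "del", "la", "las", "los", "mac", "mc", "van", "von", "y", "i", "san", "santa"}
--
-- def tokenize_parts(name_str: str):
--     """
--     Tokeniza una cadena, agrupando tokens especiales (e.g., 'de', 'la') con el token siguiente.
--     """
--     tokens = name_str.strip().split()
--     parts = []
--     prev = []
--     for token in tokens:
--         if token.lower() in special_tokens:
--             prev.append(token)
--         else:
--             if prev:
--                 # Agrupa tokens especiales con el token actual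
--                 combined = " ".join(prev + [token])
--                 parts.append(combined)
--                 prev = []
--             else:
--                 parts.append(token)
--     return parts
-- ===== SOURCE B (Python) =====
-- special_tokens = {"da", "de", "del", "la", "las", "los", "mac", "mc", "van", "von", "y", "i", "san", "santa"}
--
-- def tokenize_parts(name_str: str):
--     """Two-pointer scan: each group is a run of special tokens plus the next
--     ordinary token; a trailing run of specials with no following word is dropped."""
--     tokens = name_str.strip().split()
--     parts = []
--     i = 0
--     n = len(tokens)
--     while i < n:
--         j = i
--         while j < n and tokens[j].lower() in special_tokens:
--             j += 1
--         if j == n: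
--             break
--         parts.append(" ".join(tokens[i:j + 1]))
--         i = j + 1
--     return parts
-- ===== Notes on version B (the rewrite author's own statement) =====
-- stated objective: alternative
-- what changed: Replaces the carried accumulator list of pending specials in a for loop by an index-based two-pointer scan that finds each group's boundary (run of special tokens plus the next word) with an inner while and slices it out directly.
import Mathlib
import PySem

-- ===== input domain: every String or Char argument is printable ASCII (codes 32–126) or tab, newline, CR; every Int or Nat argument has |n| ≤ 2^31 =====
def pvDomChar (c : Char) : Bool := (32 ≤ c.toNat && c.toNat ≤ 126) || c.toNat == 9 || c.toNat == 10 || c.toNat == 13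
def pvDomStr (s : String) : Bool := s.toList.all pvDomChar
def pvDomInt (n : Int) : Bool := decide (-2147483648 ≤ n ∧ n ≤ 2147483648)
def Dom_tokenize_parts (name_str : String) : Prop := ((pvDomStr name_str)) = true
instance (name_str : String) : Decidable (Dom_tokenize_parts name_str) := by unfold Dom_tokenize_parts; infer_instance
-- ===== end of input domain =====

-- B replaces A's carried 'prev' accumulator by a two-pointer scan that finds each
-- group's boundary (run of specials + the next word) explicitly; objective: alternative.

def pvSpecialTokens : List String :=
  ["da", "de", "del", "la", "las", "los", "mac", "mc", "van", "von", "y", "i", "san", "santa"]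

def pvIsSpecial (t : String) : Bool := pvSpecialTokens.contains (PySem.Str.lower t)

-- ===== PORT A =====
-- the body of A's for loop: state = (parts, prev)
def pvStepA (st : List String × List String) (token : String) : List String × List String :=
  if pvIsSpecial token then (st.1, st.2 ++ [token])
  else if st.2 ≠ [] then (st.1 ++ [PySem.Str.join " " (st.2 ++ [token])], ([] : List String))
  else (st.1 ++ [token], st.2)

def tokenize_parts (name_str : String) : List String :=
  (List.foldl pvStepA ([], []) (PySem.Str.split₀ (PySem.Str.strip name_str))).1

-- ===== PORT B =====
-- B's inner while loop: split off the leading run of special tokens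
def pvSpanSpecial : List String → List String × List String
  | [] => ([], [])
  | t :: ts =>
    if pvIsSpecial t then
      ((t :: (pvSpanSpecial ts).1), (pvSpanSpecial ts).2)
    else ([], t :: ts)

theorem pvSpanSpecial_snd_length (ts : List String) :
    (pvSpanSpecial ts).2.length ≤ ts.length := by
  induction ts with
  | nil => simp [pvSpanSpecial]
  | cons t ts ih =>
    by_cases h : pvIsSpecial t = true <;> simp [pvSpanSpecial, h] <;> omega

-- B's outer while loop: emit one group per iteration; a trailing run of specials
-- with no following word yields nothing (B breaks there, matching A, which never flushes its pending accumulator)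
def pvAltGo : List String → List String
  | [] => []
  | t :: ts =>
    match h : (pvSpanSpecial (t :: ts)).2 with
    | [] => []
    | w :: rest =>
      PySem.Str.join " " ((pvSpanSpecial (t :: ts)).1 ++ [w]) :: pvAltGo rest
termination_by ts => ts.length
decreasing_by
  have hl := pvSpanSpecial_snd_length (t :: ts)
  rw [h] at hl
  simp at hl ⊢
  omega

def tokenize_parts_alt (name_str : String) : List String :=
  pvAltGo (PySem.Str.split₀ (PySem.Str.strip name_str))

-- ===== PRECONDITION & SPEC =====
def Spec_tokenize_parts (name_str : String) (out : List String) : Prop := out = tokenize_parts_alt name_str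
instance (name_str : String) (out : List String) : Decidable (Spec_tokenize_parts name_str out) := by unfold Spec_tokenize_parts; infer_instance

-- ===== CLAIM (what is proved, stated in full; the proofs are below) =====
def Claim_equal_tokenize_parts : Prop := ∀ (name_str : String), Dom_tokenize_parts name_str → Spec_tokenize_parts name_str (tokenize_parts name_str)

-- ===== LEMMAS AND PROOFS =====

-- B's result on ts when a run 'prev' of specials has already been consumed
def pvAltGoP (prev ts : List String) : List String :=
  match (pvSpanSpecial ts).2 with
  | [] => []
  | w :: rest =>
    PySem.Str.join " " (prev ++ (pvSpanSpecial ts).1 ++ [w]) :: pvAltGo rest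

theorem pvSpan_cons_special {t : String} (ts : List String) (h : pvIsSpecial t = true) :
    pvSpanSpecial (t :: ts) = (t :: (pvSpanSpecial ts).1, (pvSpanSpecial ts).2) := by
  simp [pvSpanSpecial, h]

theorem pvSpan_cons_not {t : String} (ts : List String) (h : pvIsSpecial t = false) :
    pvSpanSpecial (t :: ts) = ([], t :: ts) := by
  simp [pvSpanSpecial, h]

theorem pvJoin_single (t : String) : PySem.Str.join " " [t] = t := by
  simp [PySem.Str.join, PySem.Chars.join_singleton]

theorem pvAltGoP_nil_eq (ts : List String) : pvAltGoP [] ts = pvAltGo ts := by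
  cases ts with
  | nil => simp [pvAltGoP, pvAltGo, pvSpanSpecial]
  | cons t ts =>
    rw [pvAltGo]
    rcases hb : (pvSpanSpecial (t :: ts)).2 with _ | ⟨w, rest⟩ <;>
      simp [pvAltGoP, hb]

theorem pvFoldA_eq (ts : List String) : ∀ (parts prev : List String),
    (List.foldl pvStepA (parts, prev) ts).1 = parts ++ pvAltGoP prev ts := by
  induction ts with
  | nil => intro parts prev; simp [pvAltGoP, pvSpanSpecial]
  | cons t ts ih =>
    intro parts prev
    by_cases h : pvIsSpecial t = true
    · rw [List.foldl_cons]
      have hstep : pvStepA (parts, prev) t = (parts, prev ++ [t]) := by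
        simp [pvStepA, h]
      rw [hstep, ih]
      congr 1
      rw [pvAltGoP, pvAltGoP, pvSpan_cons_special ts h]
      rcases hb : (pvSpanSpecial ts).2 with _ | ⟨w, rest⟩ <;> simp
    · have h' : pvIsSpecial t = false := by simpa using h
      rw [List.foldl_cons]
      have hgoal : pvAltGoP prev (t :: ts)
          = PySem.Str.join " " (prev ++ [t]) :: pvAltGo ts := by
        rw [pvAltGoP, pvSpan_cons_not ts h']
        simp
      rcases prev with _ | ⟨p, ps⟩
      · have hstep : pvStepA (parts, ([] : List String)) t = (parts ++ [t], []) := by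
          simp [pvStepA, h']
        rw [hstep, ih, pvAltGoP_nil_eq, hgoal]
        simp [pvJoin_single]
      · have hstep : pvStepA (parts, p :: ps) t
            = (parts ++ [PySem.Str.join " " ((p :: ps) ++ [t])], ([] : List String)) := by
          simp [pvStepA, h']
        rw [hstep, ih, pvAltGoP_nil_eq, hgoal]
        simp

-- ===== VERDICT (by name: the statement is the Claim_ definition above) =====
theorem tokenize_parts_spec : Claim_equal_tokenize_parts := by
  intro name_str _
  unfold Spec_tokenize_parts tokenize_parts tokenize_parts_alt
  rw [pvFoldA_eq, pvAltGoP_nil_eq]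
  simp
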